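-- pv_equiv track=rewrite | github.com/eladdouniayoub/RSA-cryptography- | functions.py | nbr_Premier_Euler
-- ===== SOURCE A (Python) =====
-- from math import gcd
--
-- def nbr_Premier_Euler(PNumber,QNumber):
--     indEuler =(PNumber-1)*(QNumber-1)
--     Dic = []
--     for x in range(2,indEuler):
--         if gcd(x,indEuler)==1:
--             Dic.append(x)
--         else:
--             pass
--     return Dic
-- ===== SOURCE B (Python) =====
-- def nbr_Premier_Euler(PNumber, QNumber):
--     indEuler = (PNumber - 1) * (QNumber - 1)
--     if indEuler <= 2:
--         return []
--     # factor indEuler once by trial division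
--     m = indEuler
--     primes = []
--     d = 2
--     while d * d <= m:
--         if m % d == 0:
--             primes.append(d)
--             while m % d == 0:
--                 m //= d
--         d += 1
--     if m > 1:
--         primes.append(m)
--     # x is coprime to indEuler iff no prime factor of indEuler divides x
--     out = []
--     for x in range(2, indEuler):
--         for p in primes:
--             if x % p == 0:
--                 break
--         else:
--             out.append(x)
--     return out
-- ===== Notes on version B (the rewrite author's own statement) =====
-- stated objective: alternative
-- what changed: Instead of calling gcd(x, indEuler) for every x in the range, B factors indEuler once by trial division and then keeps x iff none of the prime factors of indEuler divides x.
import Mathlib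
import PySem

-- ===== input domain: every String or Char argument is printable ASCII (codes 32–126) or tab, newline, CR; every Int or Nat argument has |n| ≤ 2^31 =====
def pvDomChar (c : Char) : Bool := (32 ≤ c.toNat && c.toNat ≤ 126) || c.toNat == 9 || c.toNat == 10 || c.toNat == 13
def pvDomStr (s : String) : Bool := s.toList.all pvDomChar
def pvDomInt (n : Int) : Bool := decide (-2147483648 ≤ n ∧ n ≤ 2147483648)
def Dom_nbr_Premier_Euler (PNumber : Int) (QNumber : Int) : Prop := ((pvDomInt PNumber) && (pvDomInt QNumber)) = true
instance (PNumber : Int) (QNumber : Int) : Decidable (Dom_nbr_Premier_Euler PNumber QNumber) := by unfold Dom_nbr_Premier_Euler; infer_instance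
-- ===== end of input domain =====

-- B factors indEuler once and keeps x iff no prime factor of indEuler divides x,
-- instead of computing gcd(x, indEuler) for every x (objective: alternative algorithm).

-- ===== PORT A =====
def nbr_Premier_Euler (PNumber : Int) (QNumber : Int) : List Int :=
  let indEuler := (PNumber - 1) * (QNumber - 1)
  -- for x in range(2, indEuler): if gcd(x, indEuler)==1: Dic.append(x)
  (PySem.List.pyRange 2 indEuler 1).foldl
    (fun Dic x => if Int.gcd x indEuler = 1 then Dic ++ [x] else Dic) []

-- ===== PORT B =====
-- inner `while m % d == 0: m //= d` of Source B; fuel only makes the loop total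
-- (m.toNat steps always suffice: m strictly decreases while it is divided)
def pvStripF : Nat → Int → Int → Int
  | 0, m, _ => m
  | fuel + 1, m, d =>
    if PySem.Int.mod m d = 0 then pvStripF fuel (PySem.Int.floordiv m d) d else m

def pvStrip (m d : Int) : Int := pvStripF m.toNat m d

-- outer trial-division loop `while d*d <= m:` of Source B, returning (primes, final m);
-- fuel only makes the loop total (m.toNat + 1 steps always suffice)
def pvFactF : Nat → Int → Int → List Int × Int
  | 0, m, _ => ([], m)
  | fuel + 1, m, d =>
    if d * d ≤ m then
      if PySem.Int.mod m d = 0 then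
        let r := pvFactF fuel (pvStrip m d) (d + 1)
        (d :: r.1, r.2)
      else pvFactF fuel m (d + 1)
    else ([], m)

def nbr_Premier_Euler_alt (PNumber : Int) (QNumber : Int) : List Int :=
  let indEuler := (PNumber - 1) * (QNumber - 1)
  if indEuler ≤ 2 then []
  else
    let f := pvFactF (indEuler.toNat + 1) indEuler 2
    let primes := if 1 < f.2 then f.1 ++ [f.2] else f.1
    -- for x in range(2, indEuler): append x iff no p in primes divides x
    (PySem.List.pyRange 2 indEuler 1).foldl
      (fun out x =>
        if primes.all (fun p => PySem.Int.mod x p != 0) then out ++ [x] else out) []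

-- ===== PRECONDITION & SPEC =====
def Spec_nbr_Premier_Euler (PNumber : Int) (QNumber : Int) (out : List Int) : Prop := out = nbr_Premier_Euler_alt PNumber QNumber
instance (PNumber : Int) (QNumber : Int) (out : List Int) : Decidable (Spec_nbr_Premier_Euler PNumber QNumber out) := by unfold Spec_nbr_Premier_Euler; infer_instance

-- ===== CLAIM (what is proved, stated in full; the proofs are below) =====
def Claim_equal_nbr_Premier_Euler : Prop := ∀ (PNumber : Int) (QNumber : Int), Dom_nbr_Premier_Euler PNumber QNumber → Spec_nbr_Premier_Euler PNumber QNumber (nbr_Premier_Euler PNumber QNumber)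

-- ===== LEMMAS AND PROOFS =====

theorem pvStripF_pos (fuel : Nat) : ∀ m d : Int, 1 ≤ m → 2 ≤ d → 1 ≤ pvStripF fuel m d := by
  induction fuel with
  | zero => intro m d hm hd; exact hm
  | succ fuel ih =>
    intro m d hm hd
    simp only [pvStripF]
    split_ifs with h
    · rw [PySem.Int.mod_eq_zero_iff_dvd] at h
      rw [PySem.Int.floordiv_eq_ediv_of_pos (by omega)]
      refine ih _ _ ?_ hd
      rcases h with ⟨k, hk⟩
      subst hk
      rw [Int.mul_ediv_cancel_left _ (by omega : d ≠ 0)]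
      nlinarith
    · exact hm

theorem pvStripF_le (fuel : Nat) : ∀ m d : Int, 1 ≤ m → 2 ≤ d → pvStripF fuel m d ≤ m := by
  induction fuel with
  | zero => intro m d hm hd; exact le_refl m
  | succ fuel ih =>
    intro m d hm hd
    simp only [pvStripF]
    split_ifs with h
    · rw [PySem.Int.mod_eq_zero_iff_dvd] at h
      rw [PySem.Int.floordiv_eq_ediv_of_pos (by omega)]
      rcases h with ⟨k, hk⟩
      subst hk
      rw [Int.mul_ediv_cancel_left _ (by omega : d ≠ 0)]
      have hk1 : 1 ≤ k := by nlinarith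
      refine le_trans (ih _ _ hk1 hd) ?_
      nlinarith
    · exact le_refl m

theorem pvStripF_lt (fuel : Nat) (m d : Int) (hm : 1 ≤ m) (hd : 2 ≤ d)
    (hdvd : d ∣ m) (hfuel : 1 ≤ fuel) : pvStripF fuel m d < m := by
  cases fuel with
  | zero => omega
  | succ fuel =>
    simp only [pvStripF]
    rw [if_pos (by rwa [PySem.Int.mod_eq_zero_iff_dvd])]
    rw [PySem.Int.floordiv_eq_ediv_of_pos (by omega)]
    rcases hdvd with ⟨k, hk⟩
    subst hk
    rw [Int.mul_ediv_cancel_left _ (by omega : d ≠ 0)]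
    have hk1 : 1 ≤ k := by nlinarith
    refine lt_of_le_of_lt (pvStripF_le fuel k d hk1 hd) ?_
    nlinarith

theorem pvStripF_dvd (fuel : Nat) : ∀ m d : Int, 1 ≤ m → 2 ≤ d → pvStripF fuel m d ∣ m := by
  induction fuel with
  | zero => intro m d hm hd; exact dvd_refl m
  | succ fuel ih =>
    intro m d hm hd
    simp only [pvStripF]
    split_ifs with h
    · rw [PySem.Int.mod_eq_zero_iff_dvd] at h
      rw [PySem.Int.floordiv_eq_ediv_of_pos (by omega)]
      have hk1 : 1 ≤ m / d := by
        rcases h with ⟨k, hk⟩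
        subst hk
        rw [Int.mul_ediv_cancel_left _ (by omega : d ≠ 0)]
        nlinarith
      exact dvd_trans (ih _ _ hk1 hd) (Int.ediv_dvd_of_dvd h)
    · exact dvd_refl m

theorem pvStripF_not_dvd (fuel : Nat) : ∀ m d : Int, 1 ≤ m → 2 ≤ d → m.toNat ≤ fuel →
    ¬ d ∣ pvStripF fuel m d := by
  induction fuel with
  | zero => intro m d hm hd hfuel; omega
  | succ fuel ih =>
    intro m d hm hd hfuel
    simp only [pvStripF]
    split_ifs with h
    · rw [PySem.Int.mod_eq_zero_iff_dvd] at h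
      rw [PySem.Int.floordiv_eq_ediv_of_pos (by omega)]
      have hk1 : 1 ≤ m / d ∧ m / d < m := by
        rcases h with ⟨k, hk⟩
        subst hk
        rw [Int.mul_ediv_cancel_left _ (by omega : d ≠ 0)]
        constructor <;> nlinarith
      exact ih _ _ hk1.1 hd (by omega)
    · rwa [PySem.Int.mod_eq_zero_iff_dvd] at h

theorem pvStripF_prime_dvd (fuel : Nat) : ∀ m d : Int, 1 ≤ m → 2 ≤ d → ∀ q : Int, Prime q →
    q ∣ m → q ∣ pvStripF fuel m d ∨ q ∣ d := by
  induction fuel with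
  | zero => intro m d hm hd q hq hqm; exact Or.inl hqm
  | succ fuel ih =>
    intro m d hm hd q hq hqm
    simp only [pvStripF]
    split_ifs with h
    · rw [PySem.Int.mod_eq_zero_iff_dvd] at h
      rw [PySem.Int.floordiv_eq_ediv_of_pos (by omega)]
      have hk1 : 1 ≤ m / d := by
        rcases h with ⟨k, hk⟩
        subst hk
        rw [Int.mul_ediv_cancel_left _ (by omega : d ≠ 0)]
        nlinarith
      have hqm' : q ∣ d * (m / d) := by rwa [Int.mul_ediv_cancel' h]
      rcases hq.dvd_mul.mp hqm' with hqd | hqk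
      · exact Or.inr hqd
      · exact ih _ _ hk1 hd q hq hqk
    · exact Or.inl hqm

-- corresponding facts about pvStrip (full fuel)
theorem pvStrip_pos (m d : Int) (hm : 1 ≤ m) (hd : 2 ≤ d) : 1 ≤ pvStrip m d :=
  pvStripF_pos m.toNat m d hm hd

theorem pvStrip_lt (m d : Int) (hm : 1 ≤ m) (hd : 2 ≤ d) (hdvd : d ∣ m) : pvStrip m d < m :=
  pvStripF_lt m.toNat m d hm hd hdvd (by omega)

theorem pvStrip_dvd (m d : Int) (hm : 1 ≤ m) (hd : 2 ≤ d) : pvStrip m d ∣ m :=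
  pvStripF_dvd m.toNat m d hm hd

theorem pvStrip_not_dvd (m d : Int) (hm : 1 ≤ m) (hd : 2 ≤ d) : ¬ d ∣ pvStrip m d :=
  pvStripF_not_dvd m.toNat m d hm hd (le_refl _)

theorem pvStrip_prime_dvd (m d : Int) (hm : 1 ≤ m) (hd : 2 ≤ d) (q : Int) (hq : Prime q)
    (hqm : q ∣ m) : q ∣ pvStrip m d ∨ q ∣ d :=
  pvStripF_prime_dvd m.toNat m d hm hd q hq hqm

-- pvFactF with enough fuel returns a list of divisors ≥ 2 of m plus a last divisor r ≥ 1,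
-- such that every positive prime divisor of m is in the list or equals r
theorem pvFactF_spec (fuel : Nat) : ∀ m d : Int, 1 ≤ m → 2 ≤ d →
    m.toNat + 1 - d.toNat ≤ fuel →
    (∀ e : Int, 2 ≤ e → e < d → ¬ e ∣ m) →
    (∀ p ∈ (pvFactF fuel m d).1, p ∣ m ∧ 2 ≤ p) ∧
    (pvFactF fuel m d).2 ∣ m ∧ 1 ≤ (pvFactF fuel m d).2 ∧
    (∀ q : Int, Prime q → 0 < q → q ∣ m →
      q ∈ (pvFactF fuel m d).1 ∨ q = (pvFactF fuel m d).2) := by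
  induction fuel with
  | zero =>
    intro m d hm hd hfuel H
    refine ⟨by simp [pvFactF], by simp [pvFactF], by simpa [pvFactF] using hm, ?_⟩
    intro q hq hq0 hqm
    have h2q : 2 ≤ q := by
      have := hq.ne_one
      omega
    have hqle : q ≤ m := Int.le_of_dvd (by omega) hqm
    exact absurd hqm (H q h2q (by omega))
  | succ fuel ih =>
    intro m d hm hd hfuel H
    simp only [pvFactF]
    split_ifs with h hdvd
    · -- d*d ≤ m and d ∣ m: strip d out, record d
      rw [PySem.Int.mod_eq_zero_iff_dvd] at hdvd
      have hdm : d ≤ m := by nlinarith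
      have hsd : pvStrip m d ∣ m := pvStrip_dvd m d hm hd
      have hs1 : 1 ≤ pvStrip m d := pvStrip_pos m d hm hd
      have hslt : pvStrip m d < m := pvStrip_lt m d hm hd hdvd
      have H' : ∀ e : Int, 2 ≤ e → e < d + 1 → ¬ e ∣ pvStrip m d := by
        intro e he1 he2 hedvd
        rcases lt_or_eq_of_le (by omega : e ≤ d) with hlt | heq
        · exact H e he1 hlt (dvd_trans hedvd hsd)
        · exact pvStrip_not_dvd m d hm hd (heq ▸ hedvd)
      obtain ⟨ihA, ihB, ihC, ihD⟩ := ih (pvStrip m d) (d + 1) hs1 (by omega) (by omega) H'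
      refine ⟨?_, dvd_trans ihB hsd, ihC, ?_⟩
      · intro p hp
        simp only [List.mem_cons] at hp
        rcases hp with rfl | hp
        · exact ⟨hdvd, hd⟩
        · obtain ⟨h1, h2⟩ := ihA p hp
          exact ⟨dvd_trans h1 hsd, h2⟩
      · intro q hq hq0 hqm
        have h2q : 2 ≤ q := by
          have := hq.ne_one
          omega
        rcases pvStrip_prime_dvd m d hm hd q hq hqm with hqs | hqd
        · rcases ihD q hq hq0 hqs with hin | heq
          · exact Or.inl (List.mem_cons_of_mem _ hin)
          · exact Or.inr heq
        · have hqled : q ≤ d := Int.le_of_dvd (by omega) hqd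
          rcases lt_or_eq_of_le hqled with hlt | heq
          · exact absurd hqm (H q h2q hlt)
          · exact Or.inl (heq ▸ List.mem_cons_self)
    · -- d*d ≤ m and d ∤ m: move on to d+1
      have hdm : d ≤ m := by nlinarith
      refine ih m (d + 1) hm (by omega) (by omega) ?_
      intro e he1 he2 hedvd
      rcases lt_or_eq_of_le (by omega : e ≤ d) with hlt | heq
      · exact H e he1 hlt hedvd
      · exact hdvd (by rw [PySem.Int.mod_eq_zero_iff_dvd]; exact heq ▸ hedvd)
    · -- d*d > m: the loop ends; any remaining prime divisor equals m itself
      refine ⟨by simp, dvd_refl m, hm, ?_⟩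
      intro q hq hq0 hqm
      have h2q : 2 ≤ q := by
        have := hq.ne_one
        omega
      have hdq : d ≤ q := by
        by_contra hcon
        exact H q h2q (by omega) hqm
      have hk : q * (m / q) = m := Int.mul_ediv_cancel' hqm
      set k := m / q with hkdef
      have hk1 : 1 ≤ k := by nlinarith
      have hkdvd : k ∣ m := ⟨q, by rw [← hk]; ring⟩
      rcases lt_or_eq_of_le hk1 with hk2 | hk2
      · have hdk : d ≤ k := by
          by_contra hcon
          exact H k (by omega) (by omega) hkdvd
        exfalso
        have : d * d ≤ q * k := by nlinarith
        omega
      · right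
        simp only [← hk, ← hk2, mul_one]

-- x is coprime to n iff no recorded factor of n divides x
theorem pvKey (n : Int) (hm : 1 ≤ n) (x : Int) :
    (decide (Int.gcd x n = 1)) =
      (if 1 < (pvFactF (n.toNat + 1) n 2).2
        then (pvFactF (n.toNat + 1) n 2).1 ++ [(pvFactF (n.toNat + 1) n 2).2]
        else (pvFactF (n.toNat + 1) n 2).1).all
        (fun p => PySem.Int.mod x p != 0) := by
  obtain ⟨A1, A2, A3, A4⟩ :=
    pvFactF_spec (n.toNat + 1) n 2 hm (le_refl 2) (by omega) (fun e he1 he2 hdvd => by omega)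
  set F := pvFactF (n.toNat + 1) n 2 with hF
  set PL := if 1 < F.2 then F.1 ++ [F.2] else F.1 with hPL
  have memdvd : ∀ p ∈ PL, p ∣ n ∧ 2 ≤ p := by
    intro p hp
    rw [hPL] at hp
    split_ifs at hp with h12
    · rcases List.mem_append.mp hp with h | h
      · exact A1 p h
      · rw [List.mem_singleton] at h
        subst h
        exact ⟨A2, by omega⟩
    · exact A1 p hp
  have cover : ∀ q : Int, Prime q → 0 < q → q ∣ n → q ∈ PL := by
    intro q hq hq0 hqn
    have h2q : 2 ≤ q := by
      have := hq.ne_one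
      omega
    rcases A4 q hq hq0 hqn with h | h
    · rw [hPL]
      split_ifs
      · exact List.mem_append_left _ h
      · exact h
    · have h12 : 1 < F.2 := by omega
      rw [hPL, if_pos h12]
      exact List.mem_append_right _ (by simp [h])
  rw [Bool.eq_iff_iff]
  simp only [decide_eq_true_eq, List.all_eq_true, bne_iff_ne, ne_eq,
    PySem.Int.mod_eq_zero_iff_dvd]
  constructor
  · intro hg p hp hpx
    obtain ⟨hpn, hp2⟩ := memdvd p hp
    have hcop : IsCoprime x n := Int.isCoprime_iff_gcd_eq_one.mpr hg
    have hu := hcop.isUnit_of_dvd' hpx hpn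
    rw [Int.isUnit_iff] at hu
    omega
  · intro hall
    by_contra hg
    obtain ⟨p, hp, hpdvd⟩ := Nat.exists_prime_and_dvd hg
    have hpg : (p : Int) ∣ ((Int.gcd x n : Nat) : Int) := Int.natCast_dvd_natCast.mpr hpdvd
    have hpx : (p : Int) ∣ x := dvd_trans hpg (Int.gcd_dvd_left x n)
    have hpn : (p : Int) ∣ n := dvd_trans hpg (Int.gcd_dvd_right x n)
    have hpP : Prime (p : Int) := Nat.prime_iff_prime_int.mp hp
    exact hall _ (cover _ hpP (by exact_mod_cast hp.pos) hpn) hpx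

-- ===== VERDICT (by name: the statement is the Claim_ definition above) =====
theorem nbr_Premier_Euler_spec : Claim_equal_nbr_Premier_Euler := by
  intro P Q _
  simp only [Spec_nbr_Premier_Euler, nbr_Premier_Euler, nbr_Premier_Euler_alt]
  by_cases hc : (P - 1) * (Q - 1) ≤ 2
  · rw [if_pos hc, PySem.List.pyRange_one_eq_nil hc]
    rfl
  · rw [if_neg hc]
    rw [PySem.List.foldl_append_ite_eq_filter, PySem.List.foldl_append_if_eq_filter]
    simp only [List.nil_append]
    exact List.filter_congr fun x _ => pvKey _ (by omega) x
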